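-- pv_equiv track=rewrite | github.com/ayeeshi-poosarla/parallel_translation_alignment | distributed_computing/testingpySpark.py | build_kmer_index
-- ===== SOURCE A (Python) =====
-- from typing import List, Tuple
--
-- def generate_kmers(sequence: str, k: int) -> List[str]:
--     return [sequence[i:i + k] for i in range(len(sequence) - k + 1)]
--
-- def build_kmer_index(reference: str, protein: str, k: int) -> dict:
--     reference_kmers = generate_kmers(reference, k)
--     protein_kmers = generate_kmers(protein, k)
--
--     kmer_map = {}
--     for ref_kmer in reference_kmers:
--         match_positions = [i for i, protein_kmer in enumerate(protein_kmers) if protein_kmer == ref_kmer]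
--         if match_positions:
--             kmer_map[ref_kmer] = match_positions
--
--     return kmer_map
-- ===== SOURCE B (Python) =====
-- def build_kmer_index(reference: str, protein: str, k: int) -> dict:
--     # Index protein k-mer -> positions once, then one lookup per reference k-mer.
--     pos = {}
--     for i in range(len(protein) - k + 1):
--         kmer = protein[i:i + k]
--         pos[kmer] = pos.get(kmer, []) + [i]
--     out = {}
--     for i in range(len(reference) - k + 1):
--         kmer = reference[i:i + k]
--         m = pos.get(kmer, [])
--         if m and kmer not in out:
--             out[kmer] = m
--     return out
-- ===== Notes on version B (the rewrite author's own statement) =====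
-- stated objective: faster
-- what changed: Instead of scanning all protein k-mers once per reference k-mer, B builds a dictionary protein-kmer -> positions in one pass and does a single lookup per reference k-mer.
import Mathlib
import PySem

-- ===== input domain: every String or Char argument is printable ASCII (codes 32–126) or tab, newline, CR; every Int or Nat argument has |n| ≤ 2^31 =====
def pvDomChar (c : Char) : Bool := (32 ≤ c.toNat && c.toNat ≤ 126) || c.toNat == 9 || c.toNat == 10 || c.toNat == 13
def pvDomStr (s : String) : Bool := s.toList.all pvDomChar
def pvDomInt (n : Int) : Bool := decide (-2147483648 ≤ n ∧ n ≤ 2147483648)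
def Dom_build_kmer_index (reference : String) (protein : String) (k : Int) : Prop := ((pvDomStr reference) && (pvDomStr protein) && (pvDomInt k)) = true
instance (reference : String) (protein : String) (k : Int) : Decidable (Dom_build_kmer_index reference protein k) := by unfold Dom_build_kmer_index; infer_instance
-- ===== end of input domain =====

-- B replaces A's per-reference-kmer scan of all protein k-mers by a dictionary
-- protein-kmer -> positions built once, one lookup per reference k-mer (faster).

-- ===== PORT A =====
def generate_kmers (sequence : String) (k : Int) : List String :=
  (PySem.List.pyRange 0 (PySem.Str.len sequence - k + 1) 1).map
    (fun i => PySem.Str.slice sequence (some i) (some (i + k)))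

def build_kmer_index (reference : String) (protein : String) (k : Int) : List (String × List Int) :=
  let reference_kmers := generate_kmers reference k
  let protein_kmers := generate_kmers protein k
  let kmer_map : PySem.Dict String (List Int) :=
    reference_kmers.foldl (fun m ref_kmer =>
      let match_positions :=
        ((PySem.List.enumerate protein_kmers 0).filter (fun p => p.2 == ref_kmer)).map (fun p => p.1)
      if !match_positions.isEmpty then m.insert ref_kmer match_positions else m)
      PySem.Dict.empty
  kmer_map.items

-- ===== PORT B =====
def build_kmer_index_alt (reference : String) (protein : String) (k : Int) : List (String × List Int) :=
  let pos : PySem.Dict String (List Int) :=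
    (PySem.List.pyRange 0 (PySem.Str.len protein - k + 1) 1).foldl
      (fun d i => d.modify (PySem.Str.slice protein (some i) (some (i + k))) [] (· ++ [i]))
      PySem.Dict.empty
  let out : PySem.Dict String (List Int) :=
    (PySem.List.pyRange 0 (PySem.Str.len reference - k + 1) 1).foldl
      (fun d i =>
        let kmer := PySem.Str.slice reference (some i) (some (i + k))
        let m := pos.getD kmer []
        if !m.isEmpty && !(d.contains kmer) then d.insert kmer m else d)
      PySem.Dict.empty
  out.items

-- ===== PRECONDITION & SPEC =====
def Spec_build_kmer_index (reference : String) (protein : String) (k : Int) (out : List (String × List Int)) : Prop := out = build_kmer_index_alt reference protein k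
instance (reference : String) (protein : String) (k : Int) (out : List (String × List Int)) : Decidable (Spec_build_kmer_index reference protein k out) := by unfold Spec_build_kmer_index; infer_instance

-- ===== CLAIM (what is proved, stated in full; the proofs are below) =====
def Claim_equal_build_kmer_index : Prop := ∀ (reference : String) (protein : String) (k : Int), Dom_build_kmer_index reference protein k → Spec_build_kmer_index reference protein k (build_kmer_index reference protein k)

-- ===== LEMMAS AND PROOFS =====

-- enumerate of a mapped range pairs each index with its image
theorem enumerate_map_pyRange (f : Int → String) (s b : Int) :
    PySem.List.enumerate ((PySem.List.pyRange s b 1).map f) s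
      = (PySem.List.pyRange s b 1).map (fun i => (i, f i)) := by
  by_cases h : b ≤ s
  · rw [PySem.List.pyRange_one_eq_nil h]; simp [PySem.List.enumerate_nil]
  · push Not at h
    rw [PySem.List.pyRange_one_cons h]
    have ih := enumerate_map_pyRange f (s + 1) b
    simp [PySem.List.enumerate_cons, ih]
termination_by (b - s).toNat
decreasing_by omega

theorem mp_eq (f : Int → String) (b : Int) (rk : String) :
    ((PySem.List.enumerate ((PySem.List.pyRange 0 b 1).map f) 0).filter
        (fun p => p.2 == rk)).map (fun p => p.1)
      = (PySem.List.pyRange 0 b 1).filter (fun i => f i == rk) := by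
  rw [enumerate_map_pyRange]
  simp [List.filter_map, List.map_map, Function.comp_def]

theorem insert_eq_self (d : PySem.Dict String (List Int)) (k : String) (v : List Int)
    (hnd : d.keys.Nodup) (h : d.get? k = some v) : d.insert k v = d := by
  apply PySem.Dict.ext
  have hc : d.contains k = true := by
    rw [PySem.Dict.contains_eq_isSome_get?, h]; rfl
  rw [PySem.Dict.items_insert_of_contains _ _ hc]
  have : ∀ p ∈ d.items, (if p.1 == k then (k, v) else p) = p := by
    intro p hp
    by_cases hk : p.1 = k
    · have hp' : (p.1, p.2) ∈ d.items := by simpa using hp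
      have hg : d.get? p.1 = some p.2 := PySem.Dict.get?_of_mem_items d hp' hnd
      rw [hk] at hg; rw [hg] at h
      simp [hk, ← Option.some_inj.mp h]
      rw [← hk]
    · simp [hk]
  rw [List.map_congr_left this]
  simp

-- A's re-insertion fold equals B's first-time-only fold, given every stored
-- value is already the canonical one.
theorem fold_eq (f : Int → String) (C : String → Bool) (V : String → List Int) :
    ∀ (l : List Int) (d : PySem.Dict String (List Int)), d.keys.Nodup →
    (∀ km v, d.get? km = some v → C km = true ∧ v = V km) →
    l.foldl (fun m i => if C (f i) then m.insert (f i) (V (f i)) else m) d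
      = l.foldl (fun m i => if C (f i) && !(m.contains (f i)) then m.insert (f i) (V (f i)) else m) d := by
  intro l
  induction l with
  | nil => intro d _ _; rfl
  | cons i t ih =>
    intro d hnd hinv
    simp only [List.foldl_cons]
    by_cases hC : C (f i) = true
    · by_cases hc : d.contains (f i) = true
      · have hv : ∃ v, d.get? (f i) = some v := by
          cases hg : d.get? (f i) with
          | none => rw [PySem.Dict.get?_eq_none_iff_contains] at hg; rw [hg] at hc; cases hc
          | some v => exact ⟨v, rfl⟩
        obtain ⟨v, hg⟩ := hv
        have := (hinv _ _ hg).2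
        rw [hC, hc]
        simp only [Bool.not_true, Bool.and_false, if_true, ← this,
          insert_eq_self d (f i) v hnd hg]
        exact ih d hnd hinv
      · rw [hC]
        simp only [Bool.not_eq_true] at hc
        rw [hc]
        simp only [Bool.not_false, Bool.and_true, if_true]
        apply ih
        · exact PySem.Dict.nodup_keys_insert _ _ _ hnd
        · intro km v hkm
          rw [PySem.Dict.get?_insert] at hkm
          by_cases he : km = f i
          · subst he
            rw [if_pos rfl] at hkm
            exact ⟨hC, (Option.some_inj.mp hkm).symm⟩
          · rw [if_neg he] at hkm
            exact hinv km v hkm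
    · simp only [Bool.not_eq_true] at hC
      rw [hC]
      simp only [Bool.false_and]
      exact ih d hnd hinv

-- B's first pass: pos.get(km, []) is exactly A's match-position list for km.
theorem pos_getD (f : Int → String) (l : List Int) (km : String) :
    (l.foldl (fun d i => d.modify (f i) [] (· ++ [i])) PySem.Dict.empty).getD km []
      = l.filter (fun i => f i == km) := by
  have h1 : l.foldl (fun d i => d.modify (f i) [] (· ++ [i])) PySem.Dict.empty
      = (l.map (fun i => (f i, i))).foldl (fun d p => d.modify p.1 [] (· ++ [p.2])) PySem.Dict.empty := by
    rw [List.foldl_map]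
  rw [h1, PySem.Dict.getD_foldl_modify_append]
  simp [List.filter_map, List.map_map, Function.comp_def, PySem.Dict.getD_empty]

theorem build_kmer_index_spec : Claim_equal_build_kmer_index := by
  unfold Claim_equal_build_kmer_index Spec_build_kmer_index
  intro reference protein k _
  unfold build_kmer_index build_kmer_index_alt generate_kmers
  simp only [List.foldl_map]
  simp only [mp_eq, pos_getD]
  congr 1
  exact fold_eq
    (fun i => PySem.Str.slice reference (some i) (some (i + k)))
    (fun rk => !((PySem.List.pyRange 0 (PySem.Str.len protein - k + 1) 1).filter
        (fun i => PySem.Str.slice protein (some i) (some (i + k)) == rk)).isEmpty)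
    (fun rk => (PySem.List.pyRange 0 (PySem.Str.len protein - k + 1) 1).filter
        (fun i => PySem.Str.slice protein (some i) (some (i + k)) == rk))
    (PySem.List.pyRange 0 (PySem.Str.len reference - k + 1) 1) PySem.Dict.empty
    (by simp [PySem.Dict.keys_empty])
    (by intro km v h; rw [PySem.Dict.get?_empty] at h; cases h)
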